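/- GENERATED by farm/mkstatement.py from design/units.tsv (unit `gif_decode.P`) and the assertions of Gif/Spec/Seg_gif_decode.lean — do not edit.
   THE STATEMENT of the proof unit `gif_decode.P`: segment P of `gif_decode` (17 instructions; entries 0x10ad80;
   exits 0x10adda; ranges 0x10ad80-0x10adda)
   takes each of its entry assertions to one of its exit assertions (`Gif.Spec.gif_decode.SegP`), given the contracts of its callees.
   What the names mean: ProgX/Base/Spec/Basic.lean (the shared hypotheses), Gif/Spec/Seg_gif_decode.lean (the assertions). The theorem to prove:
   `theorem gif_decode_P_ok : Gif.Spec.gif_decode_P.Statement`. -/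
import Gif.Code
import Gif.Dec.All
import Gif.Labels
import Gif.Spec.Seg_gif_decode
namespace Gif.Spec.gif_decode_P
open X86 X86.User Asan

/-- The statement of unit `gif_decode.P`. -/
def Statement : Prop :=
  ∀ (Lay : Layout) (_hLay : Lay.hi = 0x1000000) (μ : Microarch) (_hμ : UserX.MicroOK μ) (u₀ : State)
    (_hcode : HasCodeNat Lay u₀ Gif.L.gif_decode.entry Gif.Code.code_gif_decode.nat Gif.L.gif_decode.size),
    Gif.Spec.gif_decode.SegP Lay μ u₀

end Gif.Spec.gif_decode_P
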